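-- pv_equiv track=rewrite | github.com/ERC-Midrash/ja-models-eval | arabic/sweet_correct_homograph_dataset.py | compute_word_index
-- ===== SOURCE A (Python) =====
-- def compute_word_index(sample, word, instance_id):
--     """Find the 1-indexed occurrence of `word` in sample.split(), return its position."""
--     words = sample.split()
--     occurrence_count = 0
--     for i, w in enumerate(words):
--         if w == word:
--             occurrence_count += 1
--             if occurrence_count == instance_id:
--                 return i
--     return -1
-- ===== SOURCE B (Python) =====
-- def compute_word_index(sample, word, instance_id):
--     """Find the 1-indexed occurrence of `word` in sample.split(), return its position."""
--     words = sample.split()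
--     if instance_id < 1:
--         return -1
--     start = 0
--     for _ in range(instance_id):
--         try:
--             start = words.index(word, start) + 1
--         except ValueError:
--             return -1
--     return start - 1
-- ===== Notes on version B (the rewrite author's own statement) =====
-- stated objective: alternative
-- what changed: Replaces A's single enumerate-and-count scan over the words with a loop of instance_id repeated list.index searches, each resuming just after the previous hit and returning -1 when the search raises ValueError.
import Mathlib
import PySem

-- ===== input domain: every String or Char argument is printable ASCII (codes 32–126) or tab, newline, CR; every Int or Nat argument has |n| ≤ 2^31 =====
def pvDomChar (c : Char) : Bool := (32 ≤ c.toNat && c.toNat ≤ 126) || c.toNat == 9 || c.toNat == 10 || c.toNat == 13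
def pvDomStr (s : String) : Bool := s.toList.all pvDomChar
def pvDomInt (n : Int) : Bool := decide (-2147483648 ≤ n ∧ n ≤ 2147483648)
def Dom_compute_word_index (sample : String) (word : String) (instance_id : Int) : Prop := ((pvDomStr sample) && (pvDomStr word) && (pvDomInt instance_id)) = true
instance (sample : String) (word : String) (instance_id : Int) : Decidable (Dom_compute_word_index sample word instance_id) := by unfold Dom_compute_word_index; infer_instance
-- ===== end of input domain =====

-- B replaces A's enumerate-and-count scan by a loop of instance_id repeated list.index searches resuming after each hit (alternative decomposition, same cost).


-- ===== PORT A =====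
-- A's loop: enumerate split words, count matches, return index when count hits instance_id.
def cwiLoopA (word : String) (instance_id : Int) : List (Int × String) → Int → Int
  | [], _ => -1
  | (i, w) :: rest, cnt =>
    if w = word then
      if cnt + 1 = instance_id then i
      else cwiLoopA word instance_id rest (cnt + 1)
    else cwiLoopA word instance_id rest cnt

def compute_word_index (sample : String) (word : String) (instance_id : Int) : Int :=
  cwiLoopA word instance_id (PySem.List.enumerate (PySem.Str.split₀ sample) 0) 0

-- ===== PORT B =====
-- B's loop 'for _ in range(instance_id)': fuel = instance_id (≥ 1 by the guard), state `start`.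
-- words.index(word, start) is ported exactly as start + (first index of word in words[start:]);
-- none = ValueError → return -1.  After the loop B returns start - 1.
def cwiLoopB (words : List String) (word : String) : Nat → Nat → Int
  | 0, start => (start : Int) - 1
  | k + 1, start =>
    match PySem.List.index? (words.drop start) word with
    | none => -1
    | some i => cwiLoopB words word k (start + i + 1)

def compute_word_index_alt (sample : String) (word : String) (instance_id : Int) : Int :=
  if instance_id < 1 then -1
  else cwiLoopB (PySem.Str.split₀ sample) word instance_id.toNat 0

-- ===== PRECONDITION & SPEC =====
def Spec_compute_word_index (sample : String) (word : String) (instance_id : Int) (out : Int) : Prop := out = compute_word_index_alt sample word instance_id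
instance (sample : String) (word : String) (instance_id : Int) (out : Int) : Decidable (Spec_compute_word_index sample word instance_id out) := by unfold Spec_compute_word_index; infer_instance

-- ===== CLAIM (what is proved, stated in full; the proofs are below) =====
def Claim_equal_compute_word_index : Prop := ∀ (sample : String) (word : String) (instance_id : Int), Dom_compute_word_index sample word instance_id → Spec_compute_word_index sample word instance_id (compute_word_index sample word instance_id)

-- ===== LEMMAS AND PROOFS =====

-- Reference: the list of 0-based positions of `word` in a word list.
def matchPos (word : String) : List String → List Nat
  | [] => []
  | w :: ws => if w = word then 0 :: (matchPos word ws).map (· + 1) else (matchPos word ws).map (· + 1)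

theorem index?_eq_head_matchPos (word : String) :
    ∀ ws : List String, PySem.List.index? ws word = (matchPos word ws).head? := by
  intro ws
  induction ws with
  | nil => simp [matchPos, PySem.List.index?]
  | cons w ws ih =>
    by_cases hw : w = word
    · subst hw
      rw [PySem.List.index?_cons_self]
      simp [matchPos]
    · rw [PySem.List.index?_cons_of_ne ws hw, ih]
      simp [matchPos, hw]

theorem matchPos_of_index?_some (word : String) :
    ∀ (ws : List String) (i : Nat), PySem.List.index? ws word = some i →
      matchPos word ws = i :: (matchPos word (ws.drop (i + 1))).map (· + (i + 1)) := by
  intro ws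
  induction ws with
  | nil => intro i h; rw [index?_eq_head_matchPos] at h; simp [matchPos] at h
  | cons w ws ih =>
    intro i h
    by_cases hw : w = word
    · subst hw
      rw [PySem.List.index?_cons_self] at h
      cases h
      simp [matchPos]
    · rw [PySem.List.index?_cons_of_ne ws hw] at h
      cases hj : PySem.List.index? ws word with
      | none => rw [hj] at h; simp at h
      | some j =>
        rw [hj] at h
        simp at h
        subst h
        have := ih j hj
        simp [matchPos, hw, this, List.map_map]

-- Invariant of B's loop: with k+1 searches remaining from offset start, it returns the
-- (k+1)-th match position of words[start:] (shifted by start), or -1.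
theorem cwiLoopB_eq (words : List String) (word : String) :
    ∀ (k start : Nat),
      cwiLoopB words word (k + 1) start =
        (let mp := matchPos word (words.drop start)
         if h : k < mp.length then (start : Int) + mp[k] else -1) := by
  intro k
  induction k with
  | zero =>
    intro start
    simp only [cwiLoopB]
    cases hidx : PySem.List.index? (words.drop start) word with
    | none =>
      rw [index?_eq_head_matchPos] at hidx
      cases hmp : matchPos word (words.drop start) with
      | nil => simp
      | cons a t => rw [hmp] at hidx; simp at hidx
    | some i =>
      have := matchPos_of_index?_some word _ _ hidx
      simp [this]
  | succ k ih =>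
    intro start
    have hstep : cwiLoopB words word (k + 1 + 1) start =
        (match PySem.List.index? (words.drop start) word with
         | none => (-1 : Int)
         | some i => cwiLoopB words word (k + 1) (start + i + 1)) := rfl
    rw [hstep]
    clear hstep
    cases hidx : PySem.List.index? (words.drop start) word with
    | none =>
      rw [index?_eq_head_matchPos] at hidx
      cases hmp : matchPos word (words.drop start) with
      | nil => simp
      | cons a t => rw [hmp] at hidx; simp at hidx
    | some i =>
      have hmp := matchPos_of_index?_some word _ _ hidx
      have hdd : (words.drop start).drop (i + 1) = words.drop (start + i + 1) := by
        rw [List.drop_drop]; congr 1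
      show cwiLoopB words word (k + 1) (start + i + 1) = _
      rw [ih (start + i + 1), ← hdd]
      simp only [hmp, List.length_cons, List.length_map]
      by_cases hk : k < (matchPos word ((words.drop start).drop (i + 1))).length
      · rw [dif_pos hk, dif_pos (by omega)]
        simp
        ring
      · rw [dif_neg hk, dif_neg (by omega)]

-- Invariant of A's loop (over the enumerated words): with `cnt` matches already seen,
-- it returns the (instance_id - cnt)-th match position of the enumerated tail, or -1.
theorem cwiLoopA_eq (word : String) (instance_id : Int) :
    ∀ (ws : List String) (n : Int) (cnt : Int),
      cwiLoopA word instance_id (PySem.List.enumerate ws n) cnt =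
        (let mp := matchPos word ws
         if h : 1 ≤ instance_id - cnt ∧ instance_id - cnt ≤ (mp.length : Int) then
           n + (mp[(instance_id - cnt - 1).toNat]'(by omega) : Int)
         else -1) := by
  intro ws
  induction ws with
  | nil => intro n cnt; simp [PySem.List.enumerate_nil, cwiLoopA, matchPos]; omega
  | cons w ws ih =>
    intro n cnt
    rw [PySem.List.enumerate_cons]
    by_cases hw : w = word
    · simp only [cwiLoopA, matchPos, if_pos hw]
      by_cases hhit : cnt + 1 = instance_id
      · have h1 : instance_id - cnt = 1 := by omega
        simp [h1]
        exact fun h => absurd hhit h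
      · rw [if_neg hhit, ih (n + 1) (cnt + 1)]
        simp only [List.length_cons, List.length_map]
        by_cases hlo : 1 ≤ instance_id - (cnt + 1)
        · by_cases hhi : instance_id - (cnt + 1) ≤ ((matchPos word ws).length : Int)
          · rw [dif_pos ⟨hlo, hhi⟩, dif_pos (by push_cast; omega)]
            have hk : (instance_id - cnt - 1).toNat = (instance_id - (cnt + 1) - 1).toNat + 1 := by omega
            simp only [hk, List.getElem_cons_succ, List.getElem_map]
            push_cast
            ring
          · rw [dif_neg (by intro h; exact hhi h.2), dif_neg (by push_cast; omega)]
        · rw [dif_neg (by intro h; exact hlo h.1), dif_neg (by omega)]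
    · simp only [cwiLoopA, matchPos, if_neg hw]
      rw [ih (n + 1) cnt]
      simp only [List.length_map]
      by_cases h : 1 ≤ instance_id - cnt ∧ instance_id - cnt ≤ ((matchPos word ws).length : Int)
      · rw [dif_pos h, dif_pos h]
        simp only [List.getElem_map]
        push_cast
        ring
      · rw [dif_neg h, dif_neg h]

-- ===== VERDICT (by name: the statement is the Claim_ definition above) =====
theorem compute_word_index_spec : Claim_equal_compute_word_index := by
  intro sample word iid _
  unfold Spec_compute_word_index compute_word_index compute_word_index_alt
  rw [cwiLoopA_eq]
  by_cases hlt : iid < 1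
  · rw [if_pos hlt]
    rw [dif_neg (by omega)]
  · rw [if_neg hlt]
    obtain ⟨k, hk⟩ : ∃ k : Nat, iid.toNat = k + 1 := ⟨iid.toNat - 1, by omega⟩
    rw [hk, cwiLoopB_eq]
    simp only [List.drop_zero]
    by_cases hin : k < (matchPos word (PySem.Str.split₀ sample)).length
    · rw [dif_pos hin, dif_pos (by constructor <;> [omega; (push_cast; omega)])]
      simp [hk]
    · rw [dif_neg hin, dif_neg (by intro h; omega)]
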